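-- pv_equiv track=rewrite | github.com/DataCrew-Algorithm/yosep | BOJ_1292.py | sum_sequence
-- ===== SOURCE A (Python) =====
-- def sum_sequence(N): # N번째 자리수까지의 수열의 합을 구하는 함수
--     sum_result = 0
--     sequence_num = 1 # 1씩 증가시킬 수열, 초기값 = 1
--     while N > 0:
--         for _ in range(sequence_num): #  '1'은 1번 반복, 2'는 2번반복, 3'은 3번 반복....
--             sum_result += sequence_num
--             N -= 1
--             if N == 0:
--                 break
--         sequence_num += 1 # while문이 한번 반복할 때마다 + 1 씩 증가
--     return sum_result
-- ===== SOURCE B (Python) =====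
-- def sum_sequence(N):
--     if N <= 0:
--         return 0
--     k = 0  # number of complete blocks 1,22,333,... fitting in N terms
--     while (k + 1) * (k + 2) // 2 <= N:
--         k += 1
--     # sum of complete blocks: 1^2 + 2^2 + ... + k^2, plus partial block of value k+1
--     return k * (k + 1) * (2 * k + 1) // 6 + (N - k * (k + 1) // 2) * (k + 1)
-- ===== Notes on version B (the rewrite author's own statement) =====
-- stated objective: faster
-- what changed: Replaces the term-by-term O(N) accumulation with an O(sqrt(N)) block search plus closed-form triangular/square-pyramidal sums.
import Mathlib
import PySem

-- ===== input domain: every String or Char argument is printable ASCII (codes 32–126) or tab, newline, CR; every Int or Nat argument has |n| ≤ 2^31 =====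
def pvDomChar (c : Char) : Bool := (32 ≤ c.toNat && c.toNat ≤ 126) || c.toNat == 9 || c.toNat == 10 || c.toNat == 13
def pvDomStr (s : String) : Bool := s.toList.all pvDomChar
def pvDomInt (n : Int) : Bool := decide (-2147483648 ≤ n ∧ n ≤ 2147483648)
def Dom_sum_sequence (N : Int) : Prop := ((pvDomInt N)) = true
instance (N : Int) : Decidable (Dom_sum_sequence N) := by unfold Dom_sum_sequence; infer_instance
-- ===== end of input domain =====

-- B replaces A's term-by-term O(N) accumulation by a block search with closed-form sums (objective: faster).

-- ===== PORT A =====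
-- the inner 'for _ in range(sequence_num)' with its 'if N == 0: break'; returns (sum_result, N)
def pvInnerA : Nat → Int → Int → Int → Int × Int
  | 0, sum, _, N => (sum, N)
  | c + 1, sum, seq, N =>
      let sum := sum + seq
      let N := N - 1
      if N = 0 then (sum, N) else pvInnerA c sum seq N

-- the outer 'while N > 0' loop; fuel bounds the iteration count (each pass consumes ≥ 1 from N)
def pvOuterA : Nat → Int → Int → Int → Int
  | 0, sum, _, _ => sum
  | f + 1, sum, seq, N =>
      if N > 0 then
        let p := pvInnerA seq.toNat sum seq N
        pvOuterA f p.1 (seq + 1) p.2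
      else sum

def sum_sequence (N : Int) : Int := pvOuterA (N.toNat + 1) 0 1 N

-- ===== PORT B =====
-- the 'while (k+1)*(k+2)//2 <= N: k += 1' loop; fuel bounds the iteration count
def pvFindK : Nat → Int → Int → Int
  | 0, k, _ => k
  | f + 1, k, N =>
      if PySem.Int.floordiv ((k + 1) * (k + 2)) 2 ≤ N then pvFindK f (k + 1) N else k

def sum_sequence_alt (N : Int) : Int :=
  if N ≤ 0 then 0
  else
    let k := pvFindK (N.toNat + 1) 0 N
    PySem.Int.floordiv (k * (k + 1) * (2 * k + 1)) 6
      + (N - PySem.Int.floordiv (k * (k + 1)) 2) * (k + 1)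

-- ===== PRECONDITION & SPEC =====
def Spec_sum_sequence (N : Int) (out : Int) : Prop := out = sum_sequence_alt N
instance (N : Int) (out : Int) : Decidable (Spec_sum_sequence N out) := by unfold Spec_sum_sequence; infer_instance

-- ===== CLAIM (what is proved, stated in full; the proofs are below) =====
def Claim_equal_sum_sequence : Prop := ∀ (N : Int), Dom_sum_sequence N → Spec_sum_sequence N (sum_sequence N)

-- ===== LEMMAS AND PROOFS =====

-- triangular and square-pyramidal numbers, recursively
def pvT : Nat → Int
  | 0 => 0
  | k + 1 => pvT k + (k + 1)

def pvQ : Nat → Int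
  | 0 => 0
  | k + 1 => pvQ k + ((k : Int) + 1) * ((k : Int) + 1)

-- reference: sum of n terms of the sequence, starting at a fresh block of value k+1
def pvR (k : Nat) (n : Nat) : Int :=
  if n ≤ k + 1 then (n : Int) * ((k : Int) + 1)
  else ((k : Int) + 1) * ((k : Int) + 1) + pvR (k + 1) (n - (k + 1))
termination_by n
decreasing_by omega

theorem pvT_two_mul (k : Nat) : 2 * pvT k = (k : Int) * (k + 1) := by
  induction k with
  | zero => simp [pvT]
  | succ k ih => simp only [pvT]; push_cast; nlinarith [ih]

theorem pvQ_six_mul (k : Nat) : 6 * pvQ k = (k : Int) * (k + 1) * (2 * k + 1) := by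
  induction k with
  | zero => simp [pvQ]
  | succ k ih => simp only [pvQ]; push_cast; nlinarith [ih]

theorem floordiv_T (k : Nat) :
    PySem.Int.floordiv ((k : Int) * ((k : Int) + 1)) 2 = pvT k := by
  rw [← pvT_two_mul, PySem.Int.floordiv_eq_ediv_of_pos (by omega)]
  exact Int.mul_ediv_cancel_left _ (by omega)

theorem floordiv_Q (k : Nat) :
    PySem.Int.floordiv ((k : Int) * ((k : Int) + 1) * (2 * (k : Int) + 1)) 6 = pvQ k := by
  rw [← pvQ_six_mul, PySem.Int.floordiv_eq_ediv_of_pos (by omega)]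
  exact Int.mul_ediv_cancel_left _ (by omega)

theorem pvT_ge (k : Nat) : (k : Int) ≤ pvT k := by
  induction k with
  | zero => simp [pvT]
  | succ k ih => simp only [pvT]; push_cast; omega

theorem pvT_mono {a b : Nat} (h : a ≤ b) : pvT a ≤ pvT b := by
  induction h with
  | refl => exact le_refl _
  | step _ ih => simp only [pvT]; omega

-- inner loop: with 1 ≤ N it consumes min c N terms of value seq
theorem innerA_eq (c : Nat) : ∀ (sum seq N : Int), 1 ≤ N →
    pvInnerA c sum seq N = (sum + min (c : Int) N * seq, N - min (c : Int) N) := by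
  induction c with
  | zero => intro sum seq N hN; simp [pvInnerA]; omega
  | succ c ih =>
      intro sum seq N hN
      simp only [pvInnerA]
      by_cases h1 : N - 1 = 0
      · have : N = 1 := by omega
        subst this
        simp only [h1, if_pos]
        have hm : min ((c : Int) + 1) 1 = 1 := by omega
        push_cast
        rw [hm]; ring_nf
      · rw [if_neg h1, ih _ _ _ (by omega)]
        have hm : min ((c : Int) + 1) N = min (c : Int) (N - 1) + 1 := by omega
        push_cast
        rw [hm]; ring_nf

theorem outerA_zero (f : Nat) (sum seq : Int) : pvOuterA f sum seq 0 = sum := by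
  cases f <;> simp [pvOuterA]

theorem outerA_eq (n : Nat) : ∀ (k fuel : Nat) (sum : Int), 1 ≤ n → n ≤ fuel →
    pvOuterA fuel sum ((k : Int) + 1) (n : Int) = sum + pvR k n := by
  induction n using Nat.strong_induction_on with
  | _ n ih =>
    intro k fuel sum hn hfuel
    obtain ⟨f, rfl⟩ : ∃ f, fuel = f + 1 := ⟨fuel - 1, by omega⟩
    have hN : (0 : Int) < n := by exact_mod_cast hn
    simp only [pvOuterA, if_pos hN]
    have htn : ((k : Int) + 1).toNat = k + 1 := by omega
    rw [htn, innerA_eq _ _ _ _ (by exact_mod_cast hn)]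
    dsimp only
    push_cast
    by_cases hle : n ≤ k + 1
    · have hm : min ((k : Int) + 1) (n : Int) = (n : Int) := by omega
      rw [hm, sub_self, outerA_zero, pvR.eq_def, if_pos hle]
    · have hm : min ((k : Int) + 1) (n : Int) = (k : Int) + 1 := by omega
      rw [hm]
      have hcast : (n : Int) - ((k : Int) + 1) = ((n - (k + 1) : Nat) : Int) := by omega
      have hseq : (k : Int) + 1 + 1 = ((k + 1 : Nat) : Int) + 1 := by push_cast; ring
      rw [hcast, hseq, ih (n - (k + 1)) (by omega) (k + 1) f _ (by omega) (by omega)]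
      rw [show pvR k n = ((k : Int) + 1) * ((k : Int) + 1) + pvR (k + 1) (n - (k + 1)) by
        rw [pvR.eq_def, if_neg hle]]
      ring

-- closed form of pvR: m complete blocks, then a partial block of value m+1
theorem pvR_closed (n : Nat) : ∀ (c m : Nat), 1 ≤ n → c ≤ m →
    pvT m ≤ pvT c + n → pvT c + (n : Int) ≤ pvT (m + 1) →
    pvR c n = (pvQ m - pvQ c) + (pvT c + (n : Int) - pvT m) * ((m : Int) + 1) := by
  induction n using Nat.strong_induction_on with
  | _ n ih =>
    intro c m hn hcm hTm hTm1
    by_cases hle : n ≤ c + 1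
    · -- m = c, or m = c+1 with n = c+1
      have hmle : m ≤ c + 1 := by
        by_contra h
        have := pvT_mono (show c + 1 + 1 ≤ m by omega)
        simp only [pvT] at this hTm
        push_cast at this hTm
        omega
      rcases Nat.lt_or_ge m (c + 1) with h' | h'
      · have : m = c := by omega
        subst this
        rw [pvR, if_pos hle]; ring
      · have hmc : m = c + 1 := by omega
        subst hmc
        have h1 : pvT (c + 1) ≤ pvT c + n := hTm
        simp only [pvT] at h1
        have hne : n = c + 1 := by omega
        subst hne
        rw [pvR, if_pos hle]
        simp only [pvQ, pvT]
        push_cast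
        ring
    · -- recursive block
      have hm1 : c + 1 ≤ m := by
        by_contra h
        have hmc : m = c := by omega
        subst hmc
        simp only [pvT] at hTm1
        omega
      rw [pvR, if_neg hle]
      have hTc1 : pvT (c + 1) = pvT c + ((c : Int) + 1) := by simp [pvT]
      have hcn : pvT (c + 1) + ((n - (c + 1) : Nat) : Int) = pvT c + n := by
        rw [hTc1]; omega
      rw [ih (n - (c + 1)) (by omega) (c + 1) m (by omega) hm1 (by omega) (by omega)]
      have hQ : pvQ (c + 1) = pvQ c + ((c : Int) + 1) * ((c : Int) + 1) := by
        simp [pvQ]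
      rw [hQ, hcn]
      ring

-- pvFindK finds the unique r with pvT r ≤ N < pvT (r+1)
theorem findK_eq (fuel : Nat) : ∀ (k : Nat) (N : Int), pvT k ≤ N → (k : Int) + fuel ≥ N + 1 →
    ∃ r : Nat, pvFindK fuel (k : Int) N = (r : Int) ∧ pvT r ≤ N ∧ N < pvT (r + 1) := by
  induction fuel with
  | zero =>
      intro k N hk hf
      exfalso
      have h2 : (k : Int) ≤ N := le_trans (pvT_ge k) hk
      push_cast at hf
      omega
  | succ f ih =>
      intro k N hk hf
      simp only [pvFindK]
      by_cases h : PySem.Int.floordiv (((k : Int) + 1) * ((k : Int) + 2)) 2 ≤ N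
      · have hT : pvT (k + 1) ≤ N := by
          have := floordiv_T (k + 1)
          push_cast at this
          rw [show ((k:Int)+1) * ((k:Int)+2) = ((k:Int)+1) * (((k:Int)+1)+1) by ring] at h
          rwa [this] at h
        rw [if_pos h]
        have hk1 : ((k : Int) + 1) = ((k + 1 : Nat) : Int) := by push_cast; ring
        rw [hk1]
        have hfn : ((k + 1 : Nat) : Int) + (f : Nat) ≥ N + 1 := by omega
        exact ih (k + 1) N hT hfn
      · rw [if_neg h]
        refine ⟨k, rfl, hk, ?_⟩
        have := floordiv_T (k + 1)
        push_cast at this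
        rw [show ((k:Int)+1) * ((k:Int)+2) = ((k:Int)+1) * (((k:Int)+1)+1) by ring] at h
        rw [this] at h
        omega

-- ===== VERDICT (by name: the statement is the Claim_ definition above) =====
theorem sum_sequence_spec : Claim_equal_sum_sequence := by
  intro N _
  unfold Spec_sum_sequence sum_sequence sum_sequence_alt
  by_cases hN : N ≤ 0
  · rw [if_pos hN]
    have : N.toNat + 1 = 0 + 1 := by omega
    rw [this]
    simp only [pvOuterA]
    rw [if_neg (by omega)]
  · rw [if_neg hN]
    have hn1 : 1 ≤ N.toNat := by omega
    have hNn : ((N.toNat : Int)) = N := by omega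
    -- A side
    have hA : pvOuterA (N.toNat + 1) 0 1 N = pvR 0 N.toNat := by
      have := outerA_eq N.toNat 0 (N.toNat + 1) 0 hn1 (by omega)
      push_cast at this
      rw [hNn] at this
      simpa using this
    rw [hA]
    -- B side
    obtain ⟨r, hr, hTr, hTr1⟩ := findK_eq (N.toNat + 1) 0 N (by show (0 : Int) ≤ N; omega)
      (by omega)
    have hr0 : pvFindK (N.toNat + 1) 0 N = (r : Int) := by exact_mod_cast hr
    rw [hr0]
    have hQr := floordiv_Q r
    have hTrr := floordiv_T r
    show pvR 0 N.toNat = PySem.Int.floordiv ((r:Int) * ((r:Int) + 1) * (2 * (r:Int) + 1)) 6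
      + (N - PySem.Int.floordiv ((r:Int) * ((r:Int) + 1)) 2) * ((r:Int) + 1)
    rw [hQr, hTrr]
    have hT0 : pvT 0 = 0 := rfl
    have hQ0 : pvQ 0 = 0 := rfl
    have hRc := pvR_closed N.toNat 0 r hn1 (by omega)
      (by rw [hT0]; omega)
      (by rw [hT0]; omega)
    rw [hRc, hQ0, hT0]
    rw [show ((N.toNat : Nat) : Int) = N from hNn]
    ring
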